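-- pv_equiv track=rewrite | github.com/lucascbarbosa/MusicaFormalizada | Trabalho 3- Composição por Teoria dos Jogos/main.py | get_possible_notes
-- ===== SOURCE A (Python) =====
-- def get_possible_notes(scale, octave_start,num):
--     notes = []
--     start = (octave_start+1)*12 + scale
--     intervals = [2,2,1,2,2,2,1]
--     note = start
--     i = 0
--     while len(notes) < num:
--         notes.append(note)
--         note += intervals[i]
--         i += 1
--         if i == 7:
--             i = 0
--     return notes
-- ===== SOURCE B (Python) =====
-- def get_possible_notes(scale, octave_start, num):
--     prefix = [0, 2, 4, 5, 7, 9, 11]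
--     start = (octave_start + 1) * 12 + scale
--     return [start + 12 * (i // 7) + prefix[i % 7] for i in range(num)]
-- ===== Notes on version B (the rewrite author's own statement) =====
-- stated objective: simpler
-- what changed: Replaced the while loop with running accumulator and cyclic interval index by a closed-form list comprehension: note i is start + 12*(i//7) + prefix[i%7] with the prefix-sum table of the interval pattern.
import Mathlib
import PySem

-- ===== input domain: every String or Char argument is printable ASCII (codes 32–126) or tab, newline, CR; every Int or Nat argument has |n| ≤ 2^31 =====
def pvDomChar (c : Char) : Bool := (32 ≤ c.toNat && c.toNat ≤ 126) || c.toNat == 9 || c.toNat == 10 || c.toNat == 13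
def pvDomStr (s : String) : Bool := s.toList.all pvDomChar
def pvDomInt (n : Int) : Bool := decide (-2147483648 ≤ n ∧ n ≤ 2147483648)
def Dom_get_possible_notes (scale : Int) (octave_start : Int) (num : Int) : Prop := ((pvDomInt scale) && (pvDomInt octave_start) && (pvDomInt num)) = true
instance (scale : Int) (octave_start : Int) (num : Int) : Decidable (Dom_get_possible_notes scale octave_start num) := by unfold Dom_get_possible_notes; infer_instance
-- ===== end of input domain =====

-- B replaces A's running-sum while loop by a closed-form comprehension over a prefix-sum table (objective: simpler).

-- ===== PORT A =====
-- while len(notes) < num: append note; note += intervals[i]; i cycles 0..6.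
-- Recursion on the remaining count num - len(notes); the index i is always in 0..6,
-- so intervals[i] never raises and pyGetD (default 0) is exact.
def pvLoopA (remaining : Nat) (note : Int) (i : Int) : List Int :=
  match remaining with
  | 0 => []
  | n + 1 =>
      note :: pvLoopA n (note + PySem.List.pyGetD [2, 2, 1, 2, 2, 2, 1] i 0)
        (if i + 1 = 7 then 0 else i + 1)

def get_possible_notes (scale : Int) (octave_start : Int) (num : Int) : List Int :=
  pvLoopA num.toNat ((octave_start + 1) * 12 + scale) 0

-- ===== PORT B =====
-- [start + 12*(i//7) + prefix[i%7] for i in range(num)]; i % 7 ∈ 0..6, so pyGetD is exact.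
def get_possible_notes_alt (scale : Int) (octave_start : Int) (num : Int) : List Int :=
  let pfx : List Int := [0, 2, 4, 5, 7, 9, 11]
  let start : Int := (octave_start + 1) * 12 + scale
  (PySem.List.pyRange 0 num 1).map
    (fun i => start + 12 * PySem.Int.floordiv i 7 + PySem.List.pyGetD pfx (PySem.Int.mod i 7) 0)

-- ===== PRECONDITION & SPEC =====
def Spec_get_possible_notes (scale : Int) (octave_start : Int) (num : Int) (out : List Int) : Prop := out = get_possible_notes_alt scale octave_start num
instance (scale : Int) (octave_start : Int) (num : Int) (out : List Int) : Decidable (Spec_get_possible_notes scale octave_start num out) := by unfold Spec_get_possible_notes; infer_instance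

-- ===== CLAIM (what is proved, stated in full; the proofs are below) =====
def Claim_equal_get_possible_notes : Prop := ∀ (scale : Int) (octave_start : Int) (num : Int), Dom_get_possible_notes scale octave_start num → Spec_get_possible_notes scale octave_start num (get_possible_notes scale octave_start num)

-- ===== LEMMAS AND PROOFS =====

-- cumulative sum of the interval pattern after m steps, in closed form
def pvPre : Nat → Int
  | 0 => 0 | 1 => 2 | 2 => 4 | 3 => 5 | 4 => 7 | 5 => 9 | 6 => 11 | _ => 0
def pvInts : Nat → Int
  | 0 => 2 | 1 => 2 | 2 => 1 | 3 => 2 | 4 => 2 | 5 => 2 | 6 => 1 | _ => 0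
def pvPs (m : Nat) : Int := 12 * ((m / 7 : Nat) : Int) + pvPre (m % 7)

theorem pvPre_eq (r : Nat) (h : r < 7) :
    PySem.List.pyGetD [0, 2, 4, 5, 7, 9, 11] (r : Int) 0 = pvPre r := by
  interval_cases r <;> rfl

theorem pvInts_eq (r : Nat) (h : r < 7) :
    PySem.List.pyGetD [2, 2, 1, 2, 2, 2, 1] (r : Int) 0 = pvInts r := by
  interval_cases r <;> rfl

theorem pvPs_step (m : Nat) : pvPs m + pvInts (m % 7) = pvPs (m + 1) := by
  have hd : (m + 1) / 7 = (if m % 7 = 6 then m / 7 + 1 else m / 7) := by split_ifs <;> omega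
  have hm : (m + 1) % 7 = (if m % 7 = 6 then 0 else m % 7 + 1) := by split_ifs <;> omega
  have hcases : m % 7 = 0 ∨ m % 7 = 1 ∨ m % 7 = 2 ∨ m % 7 = 3 ∨ m % 7 = 4 ∨ m % 7 = 5 ∨ m % 7 = 6 := by omega
  rcases hcases with h | h | h | h | h | h | h <;>
    simp [pvPs, pvPre, pvInts, h, hd, hm] <;> omega

theorem pvLoopA_eq (n : Nat) : ∀ (m : Nat) (s : Int),
    pvLoopA n (s + pvPs m) ((m % 7 : Nat) : Int)
      = (List.range n).map (fun k => s + pvPs (m + k)) := by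
  induction n with
  | zero => intro m s; simp [pvLoopA]
  | succ n ih =>
      intro m s
      have h7 : m % 7 < 7 := Nat.mod_lt _ (by norm_num)
      have hnote : s + pvPs m + PySem.List.pyGetD [2, 2, 1, 2, 2, 2, 1] ((m % 7 : Nat) : Int) 0
          = s + pvPs (m + 1) := by
        rw [pvInts_eq (m % 7) h7]
        have := pvPs_step m
        omega
      have hi : (if ((m % 7 : Nat) : Int) + 1 = 7 then (0 : Int) else ((m % 7 : Nat) : Int) + 1)
          = (((m + 1) % 7 : Nat) : Int) := by
        split_ifs with h
        · have h6 : m % 7 = 6 := by exact_mod_cast (by omega : ((m % 7 : Nat) : Int) = 6)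
          have : (m + 1) % 7 = 0 := by omega
          simp [this]
        · have h6 : m % 7 ≠ 6 := by
            intro hc; apply h; rw [hc]; norm_num
          have : (m + 1) % 7 = m % 7 + 1 := by omega
          rw [this]; push_cast; ring
      rw [pvLoopA, hnote, hi, ih (m + 1) s, List.range_succ_eq_map, List.map_cons, List.map_map]
      simp only [Nat.add_zero]
      congr 1
      apply List.map_congr_left
      intro k _
      simp only [Function.comp_apply]
      have hk : m + 1 + k = m + (k + 1) := by omega
      rw [hk]

-- ===== VERDICT (by name: the statement is the Claim_ definition above) =====
theorem get_possible_notes_spec : Claim_equal_get_possible_notes := by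
  intro scale octave_start num _
  unfold Spec_get_possible_notes get_possible_notes get_possible_notes_alt
  have hA := pvLoopA_eq num.toNat 0 ((octave_start + 1) * 12 + scale)
  have hps0 : pvPs 0 = 0 := by norm_num [pvPs, pvPre]
  simp only [hps0, Nat.zero_mod, Nat.cast_zero, Int.add_zero, Nat.zero_add] at hA
  rw [hA, PySem.List.pyRange_one, List.map_map]
  simp only [Int.sub_zero]
  apply List.map_congr_left
  intro k _
  simp only [Function.comp_apply, Int.zero_add, pvPs]
  rw [PySem.Int.floordiv_eq_ediv_of_pos (by norm_num), PySem.Int.mod_eq_emod_of_pos (by norm_num)]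
  have hdiv : ((k : Int)) / 7 = ((k / 7 : Nat) : Int) := by omega
  have hmod : ((k : Int)) % 7 = ((k % 7 : Nat) : Int) := by omega
  rw [hdiv, hmod, pvPre_eq (k % 7) (Nat.mod_lt _ (by norm_num))]
  ring
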